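-- pv_equiv track=rewrite | github.com/Zjl1204/GUIwithTk | main_fun.py | seclet_usable_ROOT
-- ===== SOURCE A (Python) =====
-- def seclet_usable_ROOT(used_list):
--     whole_list = list(range(0,740,4)) + list(range(740,801)) + list(range(801,840))
--     indoor_list = []
--     outdoor_list = []
--     ext_list = []
--
--     usable_list = (set(whole_list).difference(set(used_list)))  # 差集
--     for i in usable_list:
--         if i in whole_list[186:247]:
--             indoor_list.append(i)
--         if i in whole_list[0:186]:
--             outdoor_list.append(i)
--         else:
--             ext_list.append(i)
--
--     indoor_list.sort()
--     outdoor_list.sort()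
--     ext_list.sort()
--
--     return indoor_list, outdoor_list, ext_list
-- ===== SOURCE B (Python) =====
-- def seclet_usable_ROOT(used_list):
--     whole_list = list(range(0, 740, 4)) + list(range(740, 801)) + list(range(801, 840))
--     used = set(used_list)
--     indoor_list = []
--     outdoor_list = []
--     ext_list = []
--
--     # whole_list is strictly ascending, so one ordered pass over its indices
--     # yields the three lists already sorted; classify each unused value by index.
--     for idx, val in enumerate(whole_list):
--         if val in used:
--             continue
--         if 186 <= idx < 247:
--             indoor_list.append(val)
--         if idx < 186:
--             outdoor_list.append(val)
--         else:
--             ext_list.append(val)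
--
--     return indoor_list, outdoor_list, ext_list
-- ===== Notes on version B (the rewrite author's own statement) =====
-- stated objective: alternative
-- what changed: Replaces A's set-difference plus per-element membership scans over freshly built slices (and three final sorts) with a single ordered pass over enumerate(whole_list) that skips used values via one prebuilt set and classifies each slot by its index, so the three lists come out already sorted.
import Mathlib
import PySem

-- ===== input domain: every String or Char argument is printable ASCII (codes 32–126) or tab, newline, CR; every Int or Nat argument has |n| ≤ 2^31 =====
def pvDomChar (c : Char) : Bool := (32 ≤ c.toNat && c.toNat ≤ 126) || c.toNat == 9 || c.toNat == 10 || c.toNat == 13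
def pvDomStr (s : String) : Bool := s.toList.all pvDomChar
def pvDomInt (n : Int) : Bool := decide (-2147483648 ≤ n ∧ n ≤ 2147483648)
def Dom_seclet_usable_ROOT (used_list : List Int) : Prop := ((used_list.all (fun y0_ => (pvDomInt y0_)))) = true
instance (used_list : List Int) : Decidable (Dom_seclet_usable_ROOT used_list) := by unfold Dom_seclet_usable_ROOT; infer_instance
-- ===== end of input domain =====

-- B replaces A's set-difference plus per-element slice-membership scans by a single
-- index-classified pass over the ascending whole list (no final sorts needed): alternative algorithm.


-- shared constant: whole_list = list(range(0,740,4)) + list(range(740,801)) + list(range(801,840))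
def pvWhole : List Int :=
  PySem.List.pyRange 0 740 4 ++ PySem.List.pyRange 740 801 1 ++ PySem.List.pyRange 801 840 1

-- ===== PORT A =====
def seclet_usable_ROOT (used_list : List Int) : List Int × List Int × List Int :=
  let whole_list := pvWhole
  -- set(whole_list).difference(set(used_list)); the loop result is sorted afterwards,
  -- so the iteration order over the set does not affect the returned value
  let usable_list := PySem.Set.diff (PySem.Set.ofList whole_list) (PySem.Set.ofList used_list)
  let res := usable_list.foldl
    (fun (acc : List Int × List Int × List Int) i =>
      let acc1 := if (PySem.List.slice whole_list (some 186) (some 247)).contains i then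
        (acc.1 ++ [i], acc.2.1, acc.2.2) else acc
      if (PySem.List.slice whole_list (some 0) (some 186)).contains i then
        (acc1.1, acc1.2.1 ++ [i], acc1.2.2)
      else
        (acc1.1, acc1.2.1, acc1.2.2 ++ [i]))
    ([], [], [])
  (PySem.List.sorted res.1 (fun x => x), PySem.List.sorted res.2.1 (fun x => x),
   PySem.List.sorted res.2.2 (fun x => x))

-- ===== PORT B =====
def seclet_usable_ROOT_alt (used_list : List Int) : List Int × List Int × List Int :=
  let whole_list := pvWhole
  let used := PySem.Set.ofList used_list
  (PySem.List.enumerate whole_list).foldl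
    (fun (acc : List Int × List Int × List Int) p =>
      if used.contains p.2 then acc
      else
        let acc1 := if 186 ≤ p.1 ∧ p.1 < 247 then (acc.1 ++ [p.2], acc.2.1, acc.2.2) else acc
        if p.1 < 186 then (acc1.1, acc1.2.1 ++ [p.2], acc1.2.2)
        else (acc1.1, acc1.2.1, acc1.2.2 ++ [p.2]))
    ([], [], [])

-- ===== PRECONDITION & SPEC =====
def Spec_seclet_usable_ROOT (used_list : List Int) (out : List Int × List Int × List Int) : Prop := out = seclet_usable_ROOT_alt used_list
instance (used_list : List Int) (out : List Int × List Int × List Int) : Decidable (Spec_seclet_usable_ROOT used_list out) := by unfold Spec_seclet_usable_ROOT; infer_instance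

-- ===== CLAIM (what is proved, stated in full; the proofs are below) =====
def Claim_equal_seclet_usable_ROOT : Prop := ∀ (used_list : List Int), Dom_seclet_usable_ROOT used_list → Spec_seclet_usable_ROOT used_list (seclet_usable_ROOT used_list)

-- ===== LEMMAS AND PROOFS =====

-- A's loop: three append-accumulators over any list, described as filters
theorem aFoldEq (pa pb : Int → Bool) (l : List Int) (i0 o0 e0 : List Int) :
    l.foldl
      (fun (acc : List Int × List Int × List Int) i =>
        let acc1 := if pa i then (acc.1 ++ [i], acc.2.1, acc.2.2) else acc
        if pb i then (acc1.1, acc1.2.1 ++ [i], acc1.2.2)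
        else (acc1.1, acc1.2.1, acc1.2.2 ++ [i]))
      (i0, o0, e0)
    = (i0 ++ l.filter pa, o0 ++ l.filter pb, e0 ++ l.filter (fun i => !pb i)) := by
  induction l generalizing i0 o0 e0 with
  | nil => simp
  | cons x xs ih =>
    simp only [List.foldl_cons, List.filter_cons]
    by_cases ha : pa x <;> by_cases hb : pb x <;>
      simp [ha, hb, ih, List.append_assoc]

-- B's loop over enumerated pairs, described as filters + projection
theorem bFoldEq (u : Int → Bool) (qa qb : Int → Prop) [DecidablePred qa] [DecidablePred qb]
    (l : List (Int × Int)) (i0 o0 e0 : List Int) :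
    l.foldl
      (fun (acc : List Int × List Int × List Int) p =>
        if u p.2 then acc
        else
          let acc1 := if qa p.1 then (acc.1 ++ [p.2], acc.2.1, acc.2.2) else acc
          if qb p.1 then (acc1.1, acc1.2.1 ++ [p.2], acc1.2.2)
          else (acc1.1, acc1.2.1, acc1.2.2 ++ [p.2]))
      (i0, o0, e0)
    = (i0 ++ (l.filter (fun p => !u p.2 && decide (qa p.1))).map Prod.snd,
       o0 ++ (l.filter (fun p => !u p.2 && decide (qb p.1))).map Prod.snd,
       e0 ++ (l.filter (fun p => !u p.2 && !decide (qb p.1))).map Prod.snd) := by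
  induction l generalizing i0 o0 e0 with
  | nil => simp
  | cons x xs ih =>
    simp only [List.foldl_cons, List.filter_cons]
    by_cases hu : u x.2 <;> by_cases ha : qa x.1 <;> by_cases hb : qb x.1 <;>
      simp [hu, ha, hb, ih, List.append_assoc]

-- filtering the enumeration by an index condition = filtering the list by the
-- matching value condition, whenever the two tests agree on every (index, value) pair
theorem enumFilterEq (q : Int × Int → Bool) (r : Int → Bool) :
    ∀ (xs : List Int) (s : Int), (∀ p ∈ PySem.List.enumerate xs s, q p = r p.2) →
      ((PySem.List.enumerate xs s).filter q).map Prod.snd = xs.filter r := by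
  intro xs
  induction xs with
  | nil => intro s _; simp [PySem.List.enumerate_nil]
  | cons x xs ih =>
    intro s h
    rw [PySem.List.enumerate_cons] at *
    have hx := h (s, x) (List.mem_cons_self ..)
    have hrest : ∀ p ∈ PySem.List.enumerate xs (s + 1), q p = r p.2 := by
      intro p hp; exact h p (List.mem_cons_of_mem _ hp)
    by_cases hr : r x <;>
      simp [hx, hr, ih (s + 1) hrest]

-- pvWhole is strictly ascending
set_option maxRecDepth 200000 in
theorem pvWhole_pairwise : pvWhole.Pairwise (· < ·) := by decide

-- the index/value correspondences on pvWhole (closed facts, checked by decide)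
set_option maxRecDepth 200000 in
theorem pvWhole_indoor : ∀ p ∈ PySem.List.enumerate pvWhole 0,
    (decide (186 ≤ p.1 ∧ p.1 < 247)) = (PySem.List.slice pvWhole (some 186) (some 247)).contains p.2 := by
  decide

set_option maxRecDepth 200000 in
theorem pvWhole_outdoor : ∀ p ∈ PySem.List.enumerate pvWhole 0,
    (decide (p.1 < 186)) = (PySem.List.slice pvWhole (some 0) (some 186)).contains p.2 := by
  decide

theorem pvWhole_nodup : pvWhole.Nodup := pvWhole_pairwise.imp ne_of_lt

-- a filter of pvWhole is sorted already
theorem sorted_filter_pvWhole (p : Int → Bool) :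
    PySem.List.sorted (pvWhole.filter p) (fun x => x) = pvWhole.filter p :=
  PySem.List.sorted_eq_self_of_pairwise _ _
    ((pvWhole_pairwise.filter p).imp le_of_lt)

theorem main_eq (used_list : List Int) :
    seclet_usable_ROOT used_list = seclet_usable_ROOT_alt used_list := by
  have hB : seclet_usable_ROOT_alt used_list
      = ([] ++ ((PySem.List.enumerate pvWhole).filter
            (fun p => !(PySem.Set.ofList used_list).contains p.2 && decide (186 ≤ p.1 ∧ p.1 < 247))).map Prod.snd,
         [] ++ ((PySem.List.enumerate pvWhole).filter
            (fun p => !(PySem.Set.ofList used_list).contains p.2 && decide (p.1 < 186))).map Prod.snd,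
         [] ++ ((PySem.List.enumerate pvWhole).filter
            (fun p => !(PySem.Set.ofList used_list).contains p.2 && !decide (p.1 < 186))).map Prod.snd) := by
    unfold seclet_usable_ROOT_alt
    exact bFoldEq (fun v => (PySem.Set.ofList used_list).contains v)
      (fun i => 186 ≤ i ∧ i < 247) (fun i => i < 186) (PySem.List.enumerate pvWhole) [] [] []
  unfold seclet_usable_ROOT
  simp only []
  have husable : PySem.Set.diff (PySem.Set.ofList pvWhole) (PySem.Set.ofList used_list)
      = pvWhole.filter (fun v => !(PySem.Set.ofList used_list).contains v) := by
    rw [PySem.Set.ofList_eq_self_of_nodup _ pvWhole_nodup]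
    rfl
  rw [husable,
    aFoldEq (fun i => (PySem.List.slice pvWhole (some 186) (some 247)).contains i)
            (fun i => (PySem.List.slice pvWhole (some 0) (some 186)).contains i),
    hB]
  simp only [List.filter_filter, List.nil_append]
  refine Prod.ext ?_ (Prod.ext ?_ ?_)
  · rw [enumFilterEq _ (fun v => !(PySem.Set.ofList used_list).contains v &&
        (PySem.List.slice pvWhole (some 186) (some 247)).contains v) pvWhole 0
        (by intro p hp; rw [pvWhole_indoor p hp]),
      sorted_filter_pvWhole]
    simp [Bool.and_comm]
  · rw [enumFilterEq
        (fun p => !(PySem.Set.ofList used_list).contains p.2 && decide (p.1 < 186))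
        (fun v => !(PySem.Set.ofList used_list).contains v &&
          (PySem.List.slice pvWhole (some 0) (some 186)).contains v) pvWhole 0
        (by intro p hp
            exact congrArg (!(PySem.Set.ofList used_list).contains p.2 && ·)
              (pvWhole_outdoor p hp)),
      sorted_filter_pvWhole]
    simp [Bool.and_comm, sorted_filter_pvWhole]
  · rw [enumFilterEq
        (fun p => !(PySem.Set.ofList used_list).contains p.2 && !decide (p.1 < 186))
        (fun v => !(PySem.Set.ofList used_list).contains v &&
          !(PySem.List.slice pvWhole (some 0) (some 186)).contains v) pvWhole 0
        (by intro p hp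
            exact congrArg (fun b => !(PySem.Set.ofList used_list).contains p.2 && !b)
              (pvWhole_outdoor p hp)),
      sorted_filter_pvWhole]
    simp [Bool.and_comm, sorted_filter_pvWhole]

-- ===== VERDICT (by name: the statement is the Claim_ definition above) =====
theorem seclet_usable_ROOT_spec : Claim_equal_seclet_usable_ROOT := by
  intro used_list _
  unfold Spec_seclet_usable_ROOT
  exact main_eq used_list
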